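-- pv_equiv track=rewrite | github.com/noorulameenkm/DataStructuresAlgorithms | LeetCode/30-day-challenge/August_2021/August 1st - August 7th/makingALargeIsland.py | make_a_large_island
-- ===== SOURCE A (Python) =====
-- from collections import deque
--
-- def make_a_large_island(grid):
--     n = len(grid)
--
--     visited = [[False for _ in range(n)] for _ in range(n)]
--     zeroes = []
--     for i in range(n):
--         for j in range(n):
--             if grid[i][j] == 0:
--                 zeroes.append((i, j))
--
--     if len(zeroes) == 0:
--         return n * n
--
--     def bfs(zero_loc):
--         queue = deque([])
--         area = 0
--         start_, end_ = zero_loc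
--         grid[start_][end_] = 1
--         queue.append((start_, end_))
--         visited[start_][end_] = True
--         while len(queue) > 0:
--             loc_i, loc_j = queue.popleft()
--             if grid[loc_i][loc_j] == 1:
--                 area += 1
--
--                 if loc_j + 1 < n and not visited[loc_i][loc_j + 1] and grid[loc_i][loc_j + 1] == 1:
--                     queue.append((loc_i, loc_j + 1))
--                     visited[loc_i][loc_j + 1] = True
--
--                 if loc_j - 1 >= 0 and not visited[loc_i][loc_j - 1]\
--                    and grid[loc_i][loc_j - 1] == 1:
--                     queue.append((loc_i, loc_j - 1))
--                     visited[loc_i][loc_j - 1] = True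
--
--                 if loc_i + 1 < n and not visited[loc_i + 1][loc_j] and grid[loc_i + 1][loc_j] == 1:
--                     queue.append((loc_i + 1, loc_j))
--                     visited[loc_i + 1][loc_j] = True
--
--                 if loc_i - 1 >= 0 and not visited[loc_i - 1][loc_j]\
--                    and grid[loc_i - 1][loc_j] == 1:
--                     queue.append((loc_i - 1, loc_j))
--                     visited[loc_i - 1][loc_j] = True
--
--         grid[start_][end_] = 0
--         return area
--
--     def restructure_visited():
--         for i in range(n):
--             for j in range(n):
--                 visited[i][j] = False
--
--     max_area = 0
--     for k in range(len(zeroes)):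
--         island_area = bfs(zeroes[k])
--         max_area = max(max_area, island_area)
--         restructure_visited()
--
--     return max_area
-- ===== SOURCE B (Python) =====
-- def make_a_large_island(grid):
--     n = len(grid)
--     zeroes = [(i, j) for i in range(n) for j in range(n) if grid[i][j] == 0]
--     if not zeroes:
--         return n * n
--     # label connected components of 1-cells once, recording each component's area
--     label = {}
--     sizes = []
--     for i in range(n):
--         for j in range(n):
--             if grid[i][j] == 1 and (i, j) not in label:
--                 cid = len(sizes)
--                 stack = [(i, j)]
--                 label[(i, j)] = cid
--                 count = 1
--                 while stack:
--                     a, b = stack.pop()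
--                     for c, d in ((a + 1, b), (a - 1, b), (a, b + 1), (a, b - 1)):
--                         if 0 <= c < n and 0 <= d < n and grid[c][d] == 1 and (c, d) not in label:
--                             label[(c, d)] = cid
--                             count += 1
--                             stack.append((c, d))
--                 sizes.append(count)
--     best = 0
--     for i, j in zeroes:
--         seen = set()
--         total = 1
--         for c, d in ((i + 1, j), (i - 1, j), (i, j + 1), (i, j - 1)):
--             if 0 <= c < n and 0 <= d < n and grid[c][d] == 1:
--                 cid = label[(c, d)]
--                 if cid not in seen:
--                     seen.add(cid)
--                     total += sizes[cid]
--         best = max(best, total)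
--     return best
-- ===== Notes on version B (the rewrite author's own statement) =====
-- stated objective: faster
-- what changed: A runs a fresh BFS flood fill from every zero cell; B labels the 1-components once with their areas and then, for each zero, sums the sizes of the distinct neighbouring components plus one.
import Mathlib
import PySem

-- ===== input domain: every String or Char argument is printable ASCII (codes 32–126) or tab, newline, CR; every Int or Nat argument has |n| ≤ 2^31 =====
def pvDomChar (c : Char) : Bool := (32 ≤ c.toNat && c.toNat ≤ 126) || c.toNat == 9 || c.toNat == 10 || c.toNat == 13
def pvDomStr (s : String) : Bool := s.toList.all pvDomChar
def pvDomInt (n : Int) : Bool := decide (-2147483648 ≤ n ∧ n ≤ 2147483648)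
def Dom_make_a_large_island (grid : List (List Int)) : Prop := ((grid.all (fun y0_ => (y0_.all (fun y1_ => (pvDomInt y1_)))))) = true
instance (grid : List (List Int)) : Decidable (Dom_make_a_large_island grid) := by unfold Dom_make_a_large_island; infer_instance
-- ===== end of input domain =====

-- B replaces A's per-zero BFS flood fill (O(n^4)) by a single component labelling pass
-- with stored areas plus a distinct-neighbour-component sum per zero (O(n^2)).
-- A mutates `grid` only temporarily and restores it, so there is no observable side effect to mirror.

-- ===== PORT A =====

-- positions are (row, col) as Python int pairs
abbrev PvPos := Int × Int

-- grid[i][j]; exact while 0 ≤ i,j and in range (the only reads performed under Pre_)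
def pvCell (g : List (List Int)) (p : PvPos) : Int :=
  if 0 ≤ p.1 ∧ 0 ≤ p.2 then (g.getD p.1.toNat []).getD p.2.toNat 0 else 0

-- grid[i][j] = v (A sets the zero cell to 1 and later restores it; the port passes the
-- modified grid to the bfs loop instead, which is the same value flow)
def pvSetCell (g : List (List Int)) (p : PvPos) (v : Int) : List (List Int) :=
  g.set p.1.toNat ((g.getD p.1.toNat []).set p.2.toNat v)

-- A's zero-collection double loop, appending as it goes
def pvZeroes (g : List (List Int)) (n : ℕ) : List PvPos :=
  (List.range n).foldl (fun acc (i : ℕ) =>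
    (List.range n).foldl (fun acc2 (j : ℕ) =>
      if pvCell g ((i : Int), (j : Int)) = 0 then acc2 ++ [(((i : Int), (j : Int)) : PvPos)]
      else acc2) acc) []

-- one of A's four `if <bound> and not visited and grid == 1` blocks (queue, visited)
def pvTryPush (g : List (List Int)) (ok : Bool) (q : PvPos)
    (st : List PvPos × Finset PvPos) : List PvPos × Finset PvPos :=
  if ok = true ∧ q ∉ st.2 ∧ pvCell g q = 1 then (st.1 ++ [q], insert q st.2) else st

-- A's `while len(queue) > 0` BFS loop; fuel n*n+1 is enough for every input satisfying
-- Pre_ (proved below), so the 0-fuel branch is never taken there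
def pvBfsLoop (n : ℕ) (g : List (List Int)) :
    ℕ → List PvPos → Finset PvPos → Int → Finset PvPos × Int
  | 0, _, vis, area => (vis, area)
  | _ + 1, [], vis, area => (vis, area)
  | fuel + 1, p :: rest, vis, area =>
    if pvCell g p = 1 then
      let st := pvTryPush g (decide (p.2 + 1 < (n : Int))) (p.1, p.2 + 1) (rest, vis)
      let st := pvTryPush g (decide (0 ≤ p.2 - 1)) (p.1, p.2 - 1) st
      let st := pvTryPush g (decide (p.1 + 1 < (n : Int))) (p.1 + 1, p.2) st
      let st := pvTryPush g (decide (0 ≤ p.1 - 1)) (p.1 - 1, p.2) st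
      pvBfsLoop n g fuel st.1 st.2 (area + 1)
    else pvBfsLoop n g fuel rest vis area

-- A's bfs(zero_loc): flip the zero to 1, queue = [z], visited[z] = True, area = 0
def pvBfs (n : ℕ) (g : List (List Int)) (z : PvPos) : Int :=
  (pvBfsLoop n (pvSetCell g z 1) (n * n + 1) [z] {z} 0).2

def make_a_large_island (grid : List (List Int)) : Int :=
  let n := grid.length
  let zeroes := pvZeroes grid n
  if zeroes.length = 0 then (n : Int) * (n : Int)
  else zeroes.foldl (fun m z => max m (pvBfs n grid z)) 0

-- ===== PORT B =====

-- the four neighbour candidates ((a+1,b),(a-1,b),(a,b+1),(a,b-1)), B's iteration order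
def pvCands (p : PvPos) : List PvPos :=
  [(p.1 + 1, p.2), (p.1 - 1, p.2), (p.1, p.2 + 1), (p.1, p.2 - 1)]

-- `0 <= c < n and 0 <= d < n`
def pvInb (n : ℕ) (p : PvPos) : Bool :=
  decide (0 ≤ p.1 ∧ p.1 < (n : Int) ∧ 0 ≤ p.2 ∧ p.2 < (n : Int))

-- B's zeroes comprehension
def pvZeroesB (g : List (List Int)) (n : ℕ) : List PvPos :=
  (List.range n).flatMap (fun (i : ℕ) =>
    ((List.range n).filter (fun (j : ℕ) => decide (pvCell g ((i : Int), (j : Int)) = 0))).map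
      (fun (j : ℕ) => (((i : Int), (j : Int)) : PvPos)))

-- B's inner `while stack:` flood fill; the label dict is ported as a function
-- PvPos → Option ℕ (key ↦ value, none = absent); state (stack, label, count)
def pvFloodLoop (n : ℕ) (g : List (List Int)) (cid : ℕ) :
    ℕ → List PvPos → (PvPos → Option ℕ) → Int → (PvPos → Option ℕ) × Int
  | 0, _, lab, cnt => (lab, cnt)
  | _ + 1, [], lab, cnt => (lab, cnt)
  | fuel + 1, p :: stk, lab, cnt =>
    let st := (pvCands p).foldl
      (fun (st : List PvPos × (PvPos → Option ℕ) × Int) q =>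
        if pvInb n q = true ∧ pvCell g q = 1 ∧ st.2.1 q = none then
          (q :: st.1, fun r => if r = q then some cid else st.2.1 r, st.2.2 + 1)
        else st) (stk, lab, cnt)
    pvFloodLoop n g cid fuel st.1 st.2.1 st.2.2

-- the row-major list of all board cells, B's outer double loop
def pvCellsList (n : ℕ) : List PvPos :=
  (List.range n).flatMap (fun (i : ℕ) =>
    (List.range n).map (fun (j : ℕ) => (((i : Int), (j : Int)) : PvPos)))

-- B's labelling double loop: (label, sizes)
def pvLabelAll (n : ℕ) (g : List (List Int)) : (PvPos → Option ℕ) × List Int :=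
  (pvCellsList n).foldl
    (fun st p =>
      if pvCell g p = 1 ∧ st.1 p = none then
        let cid := st.2.length
        let res := pvFloodLoop n g cid (n * n + 1) [p]
          (fun r => if r = p then some cid else st.1 r) 1
        (res.1, st.2 ++ [res.2])
      else st) ((fun _ => none), [])

-- B's per-zero pass: seen = set() of component ids, total = 1 + distinct component sizes
-- (`label[(c,d)]` can never miss for an in-bounds 1-cell — proved below; none-branch inert)
def pvZeroTotal (n : ℕ) (g : List (List Int)) (lab : PvPos → Option ℕ) (sizes : List Int)
    (z : PvPos) : Int :=
  ((pvCands z).foldl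
    (fun (st : PySem.Set ℕ × Int) q =>
      if pvInb n q = true ∧ pvCell g q = 1 then
        match lab q with
        | some cid => if cid ∈ st.1 then st else (st.1.add cid, st.2 + sizes.getD cid 0)
        | none => st
      else st) (PySem.Set.ofList [], 1)).2

def make_a_large_island_alt (grid : List (List Int)) : Int :=
  let n := grid.length
  let zs := pvZeroesB grid n
  if zs = [] then (n : Int) * (n : Int)
  else
    let ls := pvLabelAll n grid
    zs.foldl (fun m z => max m (pvZeroTotal n grid ls.1 ls.2 z)) 0

-- ===== PRECONDITION & SPEC =====

-- Pre_ excludes exactly the grids on which Python A raises IndexError: some row shorter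
-- than the number of rows (A reads grid[i][j] for all i, j < len(grid)). B raises there too.
def Pre_make_a_large_island (grid : List (List Int)) : Prop :=
  ∀ row ∈ grid, grid.length ≤ row.length
instance (grid : List (List Int)) : Decidable (Pre_make_a_large_island grid) := by
  unfold Pre_make_a_large_island; infer_instance

def pvWitness_make_a_large_island : List (List Int) := [[1, 0], [0, 1]]

def Spec_make_a_large_island (grid : List (List Int)) (out : Int) : Prop :=
  out = make_a_large_island_alt grid
instance (grid : List (List Int)) (out : Int) : Decidable (Spec_make_a_large_island grid out) := by
  unfold Spec_make_a_large_island; infer_instance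

-- ===== CLAIM (what is proved, stated in full; the proofs are below) =====
def Claim_equal_make_a_large_island : Prop :=
  ∀ (grid : List (List Int)), Dom_make_a_large_island grid →
    Pre_make_a_large_island grid →
    Spec_make_a_large_island grid (make_a_large_island grid)

-- ===== LEMMAS AND PROOFS =====

theorem pv_witness_ok :
    Dom_make_a_large_island pvWitness_make_a_large_island ∧
    Pre_make_a_large_island pvWitness_make_a_large_island := by
  constructor
  · decide
  · unfold Pre_make_a_large_island pvWitness_make_a_large_island; decide

-- ---------- closure infrastructure ----------

def pvNbrs (n : ℕ) (g : List (List Int)) (p : PvPos) : Finset PvPos :=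
  ((pvCands p).filter (fun q => pvInb n q && decide (pvCell g q = 1))).toFinset

def pvStep (n : ℕ) (g : List (List Int)) (S : Finset PvPos) : Finset PvPos :=
  S ∪ S.biUnion (pvNbrs n g)

def pvClosure (n : ℕ) (g : List (List Int)) (S : Finset PvPos) : Finset PvPos :=
  (pvStep n g)^[n * n] S

def pvU (n : ℕ) : Finset PvPos :=
  (Finset.range n ×ˢ Finset.range n).image (fun q => ((q.1 : Int), (q.2 : Int)))

theorem mem_pvU {n : ℕ} {p : PvPos} : p ∈ pvU n ↔ pvInb n p = true := by
  simp only [pvU, Finset.mem_image, Finset.mem_product, Finset.mem_range, pvInb,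
    decide_eq_true_eq]
  constructor
  · rintro ⟨⟨a, b⟩, ⟨ha, hb⟩, rfl⟩
    dsimp only
    refine ⟨by positivity, by exact_mod_cast ha, by positivity, by exact_mod_cast hb⟩
  · rintro ⟨h1, h2, h3, h4⟩
    refine ⟨(p.1.toNat, p.2.toNat), ⟨by omega, by omega⟩, ?_⟩
    simp [Int.toNat_of_nonneg h1, Int.toNat_of_nonneg h3]

theorem card_pvU (n : ℕ) : (pvU n).card = n * n := by
  rw [pvU, Finset.card_image_of_injective, Finset.card_product, Finset.card_range]
  rintro ⟨a, b⟩ ⟨c, d⟩ h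
  simp only [Prod.mk.injEq, Int.natCast_inj] at h
  simp [h.1, h.2]

theorem mem_pvNbrs {n : ℕ} {g : List (List Int)} {p q : PvPos} :
    q ∈ pvNbrs n g p ↔ q ∈ pvCands p ∧ pvInb n q = true ∧ pvCell g q = 1 := by
  simp [pvNbrs]

theorem pvNbrs_subset_pvU {n : ℕ} {g : List (List Int)} {p : PvPos} :
    pvNbrs n g p ⊆ pvU n := by
  intro q hq
  exact mem_pvU.2 (mem_pvNbrs.1 hq).2.1

theorem pvCands_symm {p q : PvPos} (h : q ∈ pvCands p) : p ∈ pvCands q := by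
  simp only [pvCands, List.mem_cons, List.not_mem_nil, or_false] at h ⊢
  obtain ⟨a, b⟩ := p
  obtain ⟨c, d⟩ := q
  simp only [Prod.mk.injEq] at h ⊢
  rcases h with ⟨h1, h2⟩ | ⟨h1, h2⟩ | ⟨h1, h2⟩ | ⟨h1, h2⟩ <;> omega

theorem pvStep_infl {n : ℕ} {g : List (List Int)} (S : Finset PvPos) :
    S ⊆ pvStep n g S := Finset.subset_union_left

theorem pvStep_mono {n : ℕ} {g : List (List Int)} {S T : Finset PvPos} (h : S ⊆ T) :
    pvStep n g S ⊆ pvStep n g T :=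
  Finset.union_subset_union h (Finset.biUnion_subset_biUnion_of_subset_left _ h)

theorem pvStep_subset_pvU {n : ℕ} {g : List (List Int)} {S : Finset PvPos}
    (h : S ⊆ pvU n) : pvStep n g S ⊆ pvU n := by
  refine Finset.union_subset h ?_
  intro q hq
  obtain ⟨p, _, hq⟩ := Finset.mem_biUnion.1 hq
  exact pvNbrs_subset_pvU hq

theorem pvClosure_infl {n : ℕ} {g : List (List Int)} (S : Finset PvPos) :
    S ⊆ pvClosure n g S := by
  unfold pvClosure
  induction n * n with
  | zero => simp
  | succ k ih =>
      rw [Function.iterate_succ_apply']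
      exact ih.trans (pvStep_infl _)

theorem pvClosure_mono {n : ℕ} {g : List (List Int)} {S T : Finset PvPos} (h : S ⊆ T) :
    pvClosure n g S ⊆ pvClosure n g T := by
  unfold pvClosure
  induction n * n with
  | zero => simpa
  | succ k ih =>
      rw [Function.iterate_succ_apply', Function.iterate_succ_apply']
      exact pvStep_mono ih

-- fixpoint: once every cell of the n×n board is accounted for, one more step is inert
theorem pvClosure_fix {n : ℕ} {g : List (List Int)} {S : Finset PvPos} (hS : S ⊆ pvU n) :
    pvStep n g (pvClosure n g S) = pvClosure n g S := by
  have hsub : ∀ k, (pvStep n g)^[k] S ⊆ pvU n := by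
    intro k
    induction k with
    | zero => simpa
    | succ k ih => rw [Function.iterate_succ_apply']; exact pvStep_subset_pvU ih
  have key : ∃ k, k ≤ n * n ∧ (pvStep n g)^[k] S = (pvStep n g)^[k + 1] S := by
    by_contra hcon
    push Not at hcon
    have grow : ∀ k, k ≤ n * n + 1 → S.card + k ≤ ((pvStep n g)^[k] S).card := by
      intro k
      induction k with
      | zero => simp
      | succ k ih =>
          intro hk
          have h1 : S.card + k ≤ ((pvStep n g)^[k] S).card := ih (by omega)
          have h2 : (pvStep n g)^[k] S ⊂ (pvStep n g)^[k + 1] S := by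
            refine HasSubset.Subset.ssubset_of_ne ?_ (hcon k (by omega))
            rw [Function.iterate_succ_apply']
            exact pvStep_infl _
          have := Finset.card_lt_card h2
          omega
    have h1 := grow (n * n + 1) le_rfl
    have h2 := Finset.card_le_card (hsub (n * n + 1))
    rw [card_pvU] at h2
    omega
  obtain ⟨k, hk, hfix⟩ := key
  have hfix' : pvStep n g ((pvStep n g)^[k] S) = (pvStep n g)^[k] S := by
    rw [Function.iterate_succ_apply'] at hfix; exact hfix.symm
  have hstay : ∀ m, (pvStep n g)^[m] ((pvStep n g)^[k] S) = (pvStep n g)^[k] S :=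
    fun m => Function.iterate_fixed hfix' m
  have hcl : pvClosure n g S = (pvStep n g)^[k] S := by
    unfold pvClosure
    have : n * n = (n * n - k) + k := by omega
    rw [this, Function.iterate_add_apply]
    exact hstay _
  rw [hcl, hfix']

theorem pvClosure_minimal {n : ℕ} {g : List (List Int)} {S V : Finset PvPos}
    (hSV : S ⊆ V) (hcl : ∀ p ∈ V, pvNbrs n g p ⊆ V) : pvClosure n g S ⊆ V := by
  unfold pvClosure
  induction n * n with
  | zero => simpa
  | succ k ih =>
      rw [Function.iterate_succ_apply']
      refine Finset.union_subset ih ?_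
      intro q hq
      obtain ⟨p, hp, hq⟩ := Finset.mem_biUnion.1 hq
      exact hcl p (ih hp) hq

theorem pvClosure_absorb {n : ℕ} {g : List (List Int)} {S : Finset PvPos} {p q : PvPos}
    (hS : S ⊆ pvU n) (hp : p ∈ pvClosure n g S) (hq : q ∈ pvNbrs n g p) :
    q ∈ pvClosure n g S := by
  have : q ∈ pvStep n g (pvClosure n g S) :=
    Finset.mem_union_right _ (Finset.mem_biUnion.2 ⟨p, hp, hq⟩)
  rwa [pvClosure_fix hS] at this

theorem pvClosure_closed_eq {n : ℕ} {g : List (List Int)} {S T : Finset PvPos}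
    (hS : S ⊆ pvU n) (hTS : S ⊆ T) (hT : T ⊆ pvClosure n g S) :
    pvClosure n g T = pvClosure n g S := by
  refine le_antisymm ?_ (pvClosure_mono hTS)
  refine pvClosure_minimal hT ?_
  intro p hp q hq
  exact pvClosure_absorb hS hp hq

theorem pvClosure_all_land {n : ℕ} {g : List (List Int)} {S : Finset PvPos}
    (h : ∀ p ∈ S, pvInb n p = true ∧ pvCell g p = 1) :
    ∀ p ∈ pvClosure n g S, pvInb n p = true ∧ pvCell g p = 1 := by
  unfold pvClosure
  induction n * n with
  | zero => simp only [Function.iterate_zero_apply]; exact h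
  | succ k ih =>
      rw [Function.iterate_succ_apply']
      intro p hp
      rcases Finset.mem_union.1 hp with hp | hp
      · exact ih p hp
      · obtain ⟨q, _, hp⟩ := Finset.mem_biUnion.1 hp
        exact ⟨(mem_pvNbrs.1 hp).2.1, (mem_pvNbrs.1 hp).2.2⟩

-- every iterate lies inside the closure
theorem pvIter_subset_closure {n : ℕ} {g : List (List Int)} {S : Finset PvPos}
    (hS : S ⊆ pvU n) (m : ℕ) : (pvStep n g)^[m] S ⊆ pvClosure n g S := by
  induction m with
  | zero => exact pvClosure_infl _
  | succ m ihm =>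
      rw [Function.iterate_succ_apply']
      calc pvStep n g ((pvStep n g)^[m] S)
          ⊆ pvStep n g (pvClosure n g S) := pvStep_mono ihm
        _ = pvClosure n g S := pvClosure_fix hS

theorem pvClosure_singleton_subset {n : ℕ} {g : List (List Int)} {S : Finset PvPos}
    {q : PvPos} (hS : S ⊆ pvU n) (hq : q ∈ pvClosure n g S) :
    pvClosure n g {q} ⊆ pvClosure n g S := by
  refine pvClosure_minimal (Finset.singleton_subset_iff.2 hq) ?_
  intro x hx y hy; exact pvClosure_absorb hS hx hy

-- within the land cells the step relation is symmetric, so two cells of one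
-- component generate the same closure
theorem pvClosure_comp_eq {n : ℕ} {g : List (List Int)} {r w : PvPos}
    (hr : pvInb n r = true ∧ pvCell g r = 1) (hw : w ∈ pvClosure n g {r}) :
    pvClosure n g {w} = pvClosure n g {r} := by
  have hrU : ({r} : Finset PvPos) ⊆ pvU n :=
    Finset.singleton_subset_iff.2 (mem_pvU.2 hr.1)
  have hland := pvClosure_all_land (n := n) (g := g) (S := {r})
    (by intro p hp; rw [Finset.mem_singleton] at hp; subst hp; exact hr)
  have hwU : ({w} : Finset PvPos) ⊆ pvU n :=
    Finset.singleton_subset_iff.2 (mem_pvU.2 (hland w hw).1)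
  -- r ∈ closure {w}, by induction on the iterate that reached w
  have hback : ∀ k, ∀ p, p ∈ (pvStep n g)^[k] ({r} : Finset PvPos) →
      r ∈ pvClosure n g {p} := by
    intro k
    induction k with
    | zero =>
        intro p hp
        simp only [Function.iterate_zero_apply, Finset.mem_singleton] at hp
        rw [hp]
        exact pvClosure_infl _ (Finset.mem_singleton_self r)
    | succ k ih =>
        intro p hp
        rw [Function.iterate_succ_apply'] at hp
        rcases Finset.mem_union.1 hp with hp | hp
        · exact ih p hp
        · obtain ⟨q, hq, hpq⟩ := Finset.mem_biUnion.1 hp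
          have hqcl : q ∈ pvClosure n g {r} := pvIter_subset_closure hrU k hq
          have hqland := hland q hqcl
          -- p is a land neighbour of q, hence q is a land neighbour of p
          have hqp : q ∈ pvNbrs n g p :=
            mem_pvNbrs.2 ⟨pvCands_symm (mem_pvNbrs.1 hpq).1, hqland.1, hqland.2⟩
          have hpU : ({p} : Finset PvPos) ⊆ pvU n :=
            Finset.singleton_subset_iff.2 (mem_pvU.2 (mem_pvNbrs.1 hpq).2.1)
          have hqinp : q ∈ pvClosure n g {p} :=
            pvClosure_absorb hpU (pvClosure_infl _ (Finset.mem_singleton_self p)) hqp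
          exact pvClosure_singleton_subset hpU hqinp (ih q hq)
  have hrw : r ∈ pvClosure n g {w} := hback (n * n) w hw
  exact le_antisymm (pvClosure_singleton_subset hrU hw)
    (pvClosure_singleton_subset hwU hrw)

-- ---------- A side: the BFS loop computes the closure's cardinality ----------

theorem pvTryPush_eq {n : ℕ} {g : List (List Int)} {p q : PvPos} {ok : Bool}
    (hok : ok = pvInb n q) (hcand : q ∈ pvCands p) (st : List PvPos × Finset PvPos) :
    pvTryPush g ok q st =
      if q ∈ pvNbrs n g p ∧ q ∉ st.2 then (st.1 ++ [q], insert q st.2) else st := by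
  unfold pvTryPush
  rw [hok]
  by_cases h1 : pvInb n q = true
  · by_cases h2 : pvCell g q = 1
    · by_cases h3 : q ∈ st.2
      · simp [h1, h2, h3, mem_pvNbrs]
      · simp [h1, h2, h3, mem_pvNbrs, hcand]
    · simp [h1, h2, mem_pvNbrs]
  · simp [h1, mem_pvNbrs]

theorem pvPush_fold {n : ℕ} {g : List (List Int)} {p : PvPos} :
    ∀ (cs : List (Bool × PvPos)), (∀ c ∈ cs, c.1 = pvInb n c.2 ∧ c.2 ∈ pvCands p) →
    ∀ (rest l : List PvPos) (vis : Finset PvPos),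
      l.Nodup → (∀ x ∈ l, x ∈ pvNbrs n g p ∧ x ∉ vis) →
    ∃ l', (List.foldl (fun st (c : Bool × PvPos) => pvTryPush g c.1 c.2 st)
            (rest ++ l, vis ∪ l.toFinset) cs = (rest ++ l', vis ∪ l'.toFinset)) ∧
      l'.Nodup ∧ (∀ x ∈ l', x ∈ pvNbrs n g p ∧ x ∉ vis) ∧ (∀ x ∈ l, x ∈ l') ∧
      (∀ c ∈ cs, c.2 ∈ pvNbrs n g p → c.2 ∈ vis ∪ l'.toFinset) := by
  intro cs
  induction cs with
  | nil =>
      intro _ rest l vis hnd hl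
      exact ⟨l, rfl, hnd, hl, fun x hx => hx, by simp⟩
  | cons c cs ih =>
      intro hcs rest l vis hnd hl
      obtain ⟨hok, hcand⟩ := hcs c (List.mem_cons_self)
      rw [List.foldl_cons, pvTryPush_eq hok hcand]
      by_cases hc : c.2 ∈ pvNbrs n g p ∧ c.2 ∉ vis ∪ l.toFinset
      · -- pushed
        have hnotin : c.2 ∉ l := fun h => hc.2 (Finset.mem_union_right _ (List.mem_toFinset.2 h))
        have hnd' : (l ++ [c.2]).Nodup := by
          rw [List.nodup_append]
          refine ⟨hnd, List.nodup_singleton _, ?_⟩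
          intro x hx y hy
          rw [List.mem_singleton] at hy
          rw [hy]
          exact fun hxy => hnotin (hxy ▸ hx)
        have hl' : ∀ x ∈ l ++ [c.2], x ∈ pvNbrs n g p ∧ x ∉ vis := by
          intro x hx
          rcases List.mem_append.1 hx with hx | hx
          · exact hl x hx
          · rw [List.mem_singleton] at hx
            rw [hx]
            exact ⟨hc.1, fun h => hc.2 (Finset.mem_union_left _ h)⟩
        have heq : insert c.2 (vis ∪ l.toFinset) = vis ∪ (l ++ [c.2]).toFinset := by
          ext x
          simp only [Finset.mem_insert, Finset.mem_union, List.mem_toFinset, List.mem_append,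
            List.mem_singleton]
          tauto
        rw [if_pos hc]
        simp only []
        rw [List.append_assoc, heq]
        obtain ⟨l', h1, h2, h3, h4, h5⟩ := ih (fun c hc => hcs c (List.mem_cons_of_mem _ hc))
          rest (l ++ [c.2]) vis hnd' hl'
        refine ⟨l', h1, h2, h3, fun x hx => h4 x (List.mem_append_left _ hx), ?_⟩
        intro d hd hdn
        rcases List.mem_cons.1 hd with rfl | hd
        · have hmem : d.2 ∈ l ++ [d.2] := List.mem_append_right _ (List.mem_singleton_self _)
          exact Finset.mem_union_right _ (List.mem_toFinset.2 (h4 _ hmem))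
        · exact h5 d hd hdn
      · -- not pushed
        rw [if_neg hc]
        obtain ⟨l', h1, h2, h3, h4, h5⟩ := ih (fun c hc => hcs c (List.mem_cons_of_mem _ hc))
          rest l vis hnd hl
        refine ⟨l', h1, h2, h3, h4, ?_⟩
        intro d hd hdn
        rcases List.mem_cons.1 hd with rfl | hd
        · rcases Classical.em (d.2 ∈ vis ∪ l.toFinset) with h | h
          · rcases Finset.mem_union.1 h with h | h
            · exact Finset.mem_union_left _ h
            · exact Finset.mem_union_right _
                (List.mem_toFinset.2 (h4 _ (List.mem_toFinset.1 h)))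
          · exact absurd ⟨hdn, h⟩ hc
        · exact h5 d hd hdn

def pvBfsInv (n : ℕ) (g : List (List Int)) (queue : List PvPos) (vis : Finset PvPos) : Prop :=
  queue.Nodup ∧ (∀ p ∈ queue, p ∈ vis) ∧ vis ⊆ pvU n ∧ (∀ p ∈ vis, pvCell g p = 1) ∧
  (∀ p ∈ vis, p ∉ queue → pvNbrs n g p ⊆ vis)

theorem pvClosure_eq_self_of_closed {n : ℕ} {g : List (List Int)} {vis : Finset PvPos}
    (h : ∀ p ∈ vis, pvNbrs n g p ⊆ vis) : pvClosure n g vis = vis :=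
  Finset.Subset.antisymm (pvClosure_minimal (Finset.Subset.refl _) h) (pvClosure_infl _)

theorem pvBfsLoop_spec {n : ℕ} {g : List (List Int)} :
    ∀ (fuel : ℕ) (queue : List PvPos) (vis : Finset PvPos) (area : Int),
    pvBfsInv n g queue vis → (pvU n \ vis).card + queue.length ≤ fuel →
    (pvBfsLoop n g fuel queue vis area).2
      = area + ((pvClosure n g vis).card : Int) - ((vis.card : Int)) + queue.length := by
  intro fuel
  induction fuel with
  | zero =>
      intro queue vis area hinv hfuel
      have hq : queue = [] := by
        cases queue with
        | nil => rfl
        | cons a l => simp at hfuel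
      subst hq
      rw [pvClosure_eq_self_of_closed (fun p hp => hinv.2.2.2.2 p hp (by simp))]
      simp [pvBfsLoop]
  | succ fuel ih =>
      intro queue vis area hinv hfuel
      obtain ⟨hnd, hqv, hvU, hcell, hclosed⟩ := hinv
      cases queue with
      | nil =>
          rw [pvClosure_eq_self_of_closed (fun p hp => hclosed p hp (by simp))]
          simp [pvBfsLoop]
      | cons p rest =>
          have hpvis : p ∈ vis := hqv p List.mem_cons_self
          have hpU : p ∈ pvU n := hvU hpvis
          have hpinb := mem_pvU.1 hpU
          simp only [pvInb, decide_eq_true_eq] at hpinb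
          have hstep : pvBfsLoop n g (fuel + 1) (p :: rest) vis area
              = pvBfsLoop n g fuel
                  (List.foldl (fun st (c : Bool × PvPos) => pvTryPush g c.1 c.2 st) (rest, vis)
                    [(decide (p.2 + 1 < (n : Int)), (p.1, p.2 + 1)),
                     (decide (0 ≤ p.2 - 1), (p.1, p.2 - 1)),
                     (decide (p.1 + 1 < (n : Int)), (p.1 + 1, p.2)),
                     (decide (0 ≤ p.1 - 1), (p.1 - 1, p.2))]).1
                  (List.foldl (fun st (c : Bool × PvPos) => pvTryPush g c.1 c.2 st) (rest, vis)
                    [(decide (p.2 + 1 < (n : Int)), (p.1, p.2 + 1)),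
                     (decide (0 ≤ p.2 - 1), (p.1, p.2 - 1)),
                     (decide (p.1 + 1 < (n : Int)), (p.1 + 1, p.2)),
                     (decide (0 ≤ p.1 - 1), (p.1 - 1, p.2))]).2
                  (area + 1) := by
            rw [pvBfsLoop, if_pos (hcell p hpvis)]
            rfl
          rw [hstep]
          have hguards : ∀ c ∈ [((decide (p.2 + 1 < (n : Int)) : Bool), ((p.1, p.2 + 1) : PvPos)),
                   (decide (0 ≤ p.2 - 1), (p.1, p.2 - 1)),
                   (decide (p.1 + 1 < (n : Int)), (p.1 + 1, p.2)),
                   (decide (0 ≤ p.1 - 1), (p.1 - 1, p.2))],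
              c.1 = pvInb n c.2 ∧ c.2 ∈ pvCands p := by
            intro c hc
            simp only [List.mem_cons, List.not_mem_nil, or_false] at hc
            rcases hc with rfl | rfl | rfl | rfl <;>
              exact ⟨by dsimp only; simp only [pvInb]; rw [decide_eq_decide]; omega,
                by simp [pvCands]⟩
          obtain ⟨l', hfold, hl'nd, hl'mem, _, hcover⟩ :=
            pvPush_fold (n := n) (g := g) (p := p) _ hguards rest [] vis (by simp) (by simp)
          simp only [List.append_nil, List.toFinset_nil, Finset.union_empty] at hfold
          rw [hfold]
          -- the invariant is preserved
          have hrestvis : ∀ x ∈ rest, x ∈ vis := fun x hx => hqv x (List.mem_cons_of_mem _ hx)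
          have hl'nbrs : ∀ x ∈ l', x ∈ pvNbrs n g p := fun x hx => (hl'mem x hx).1
          have hl'new : ∀ x ∈ l', x ∉ vis := fun x hx => (hl'mem x hx).2
          have hcov : pvNbrs n g p ⊆ vis ∪ l'.toFinset := by
            intro q hq
            have hqc : q ∈ pvCands p := (mem_pvNbrs.1 hq).1
            simp only [pvCands, List.mem_cons, List.not_mem_nil, or_false] at hqc
            rcases hqc with rfl | rfl | rfl | rfl
            · exact hcover (decide (p.1 + 1 < (n : Int)), (p.1 + 1, p.2)) (by simp) hq
            · exact hcover (decide (0 ≤ p.1 - 1), (p.1 - 1, p.2)) (by simp) hq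
            · exact hcover (decide (p.2 + 1 < (n : Int)), (p.1, p.2 + 1)) (by simp) hq
            · exact hcover (decide (0 ≤ p.2 - 1), (p.1, p.2 - 1)) (by simp) hq
          have hdisj : Disjoint vis l'.toFinset := by
            rw [Finset.disjoint_right]
            intro x hx
            exact hl'new x (List.mem_toFinset.1 hx)
          have hl'U : l'.toFinset ⊆ pvU n := by
            intro x hx
            exact pvNbrs_subset_pvU (hl'nbrs x (List.mem_toFinset.1 hx))
          have hinv' : pvBfsInv n g (rest ++ l') (vis ∪ l'.toFinset) := by
            refine ⟨?_, ?_, ?_, ?_, ?_⟩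
            · rw [List.nodup_append]
              refine ⟨hnd.of_cons, hl'nd, ?_⟩
              intro x hx y hy hxy
              exact hl'new y hy (hxy ▸ hrestvis x hx)
            · intro x hx
              rcases List.mem_append.1 hx with hx | hx
              · exact Finset.mem_union_left _ (hrestvis x hx)
              · exact Finset.mem_union_right _ (List.mem_toFinset.2 hx)
            · exact Finset.union_subset hvU hl'U
            · intro x hx
              rcases Finset.mem_union.1 hx with hx | hx
              · exact hcell x hx
              · exact (mem_pvNbrs.1 (hl'nbrs x (List.mem_toFinset.1 hx))).2.2
            · intro x hx hxq
              rcases Finset.mem_union.1 hx with hx | hx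
              · by_cases hxp : x = p
                · subst hxp
                  exact hcov.trans (by exact fun y hy => hy)
                · have : x ∉ rest := fun h => hxq (List.mem_append_left _ h)
                  have hxold : x ∉ p :: rest := by
                    simp [hxp, this]
                  exact (hclosed x hx hxold).trans Finset.subset_union_left
              · exact absurd (List.mem_append_right _ (List.mem_toFinset.1 hx)) hxq
          -- cardinal bookkeeping
          have hcardl' : l'.toFinset.card = l'.length := List.toFinset_card_of_nodup hl'nd
          have hsub : l'.toFinset ⊆ pvU n \ vis := by
            intro x hx
            exact Finset.mem_sdiff.2 ⟨hl'U hx, hl'new x (List.mem_toFinset.1 hx)⟩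
          have hUeq : (pvU n \ vis) \ l'.toFinset = pvU n \ (vis ∪ l'.toFinset) :=
            sdiff_sdiff _ _ _
          have hk : l'.toFinset.card ≤ (pvU n \ vis).card := Finset.card_le_card hsub
          have hcard2 : (pvU n \ (vis ∪ l'.toFinset)).card
              = (pvU n \ vis).card - l'.length := by
            rw [← hUeq, Finset.card_sdiff, Finset.inter_eq_left.2 hsub, hcardl']
          have hfuel' : (pvU n \ (vis ∪ l'.toFinset)).card + (rest ++ l').length ≤ fuel := by
            rw [hcard2, List.length_append]
            simp only [List.length_cons] at hfuel
            rw [hcardl'] at hk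
            omega
          have hres := ih (rest ++ l') (vis ∪ l'.toFinset) (area + 1) hinv' hfuel'
          rw [hres]
          have hclo : pvClosure n g (vis ∪ l'.toFinset) = pvClosure n g vis := by
            refine pvClosure_closed_eq hvU Finset.subset_union_left ?_
            refine Finset.union_subset (pvClosure_infl _) ?_
            intro x hx
            exact pvClosure_absorb hvU (pvClosure_infl _ hpvis)
              (hl'nbrs x (List.mem_toFinset.1 hx))
          have hcardv : (vis ∪ l'.toFinset).card = vis.card + l'.length := by
            rw [Finset.card_union_of_disjoint hdisj, hcardl']
          rw [hclo, hcardv, List.length_append, List.length_cons]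
          push_cast
          ring

-- ---------- reading the grid after A's single write ----------

theorem pvCell_setCell {g : List (List Int)} (hpre : ∀ row ∈ g, g.length ≤ row.length)
    {z : PvPos} (hz : pvInb g.length z = true) (q : PvPos) :
    pvCell (pvSetCell g z 1) q = if q = z then 1 else pvCell g q := by
  simp only [pvInb, decide_eq_true_eq] at hz
  obtain ⟨hz1, hz2, hz3, hz4⟩ := hz
  have hz1n : z.1.toNat < g.length := by omega
  have hrowlen : g.length ≤ (g.getD z.1.toNat []).length := by
    rw [List.getD_eq_getElem?_getD, List.getElem?_eq_getElem hz1n, Option.getD_some]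
    exact hpre _ (List.getElem_mem hz1n)
  have hz2n : z.2.toNat < (g.getD z.1.toNat []).length := by omega
  have houter : (g.set z.1.toNat ((g.getD z.1.toNat []).set z.2.toNat 1)).getD z.1.toNat []
      = (g.getD z.1.toNat []).set z.2.toNat 1 := by
    rw [List.getD_eq_getElem?_getD, List.getElem?_set_self (by simpa using hz1n),
      Option.getD_some]
  have houter_ne : ∀ k, k ≠ z.1.toNat →
      (g.set z.1.toNat ((g.getD z.1.toNat []).set z.2.toNat 1)).getD k []
        = g.getD k [] := by
    intro k hk
    rw [List.getD_eq_getElem?_getD, List.getElem?_set_ne (by omega),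
      ← List.getD_eq_getElem?_getD]
  have hinner : ((g.getD z.1.toNat []).set z.2.toNat 1).getD z.2.toNat 0 = 1 := by
    rw [List.getD_eq_getElem?_getD, List.getElem?_set_self (by simpa using hz2n),
      Option.getD_some]
  have hinner_ne : ∀ k, k ≠ z.2.toNat →
      ((g.getD z.1.toNat []).set z.2.toNat 1).getD k 0 = (g.getD z.1.toNat []).getD k 0 := by
    intro k hk
    rw [List.getD_eq_getElem?_getD, List.getElem?_set_ne (by omega),
      ← List.getD_eq_getElem?_getD]
  by_cases hq : q = z
  · rw [if_pos hq]
    rw [hq]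
    simp only [pvCell, pvSetCell, if_pos (And.intro hz1 hz3)]
    rw [houter, hinner]
  · rw [if_neg hq]
    simp only [pvCell, pvSetCell]
    by_cases hq0 : 0 ≤ q.1 ∧ 0 ≤ q.2
    · rw [if_pos hq0, if_pos hq0]
      by_cases hrow : q.1.toNat = z.1.toNat
      · have hq1 : q.1 = z.1 := by omega
        have hq2 : q.2 ≠ z.2 := fun h => hq (Prod.ext hq1 h)
        have hcol : q.2.toNat ≠ z.2.toNat := by omega
        rw [hrow, houter, hinner_ne _ hcol]
      · rw [houter_ne _ hrow]
    · rw [if_neg hq0, if_neg hq0]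

-- the zero cell flipped to 1 is land in the modified grid
theorem pvCell_setCell_self {g : List (List Int)} (hpre : ∀ row ∈ g, g.length ≤ row.length)
    {z : PvPos} (hz : pvInb g.length z = true) :
    pvCell (pvSetCell g z 1) z = 1 := by
  rw [pvCell_setCell hpre hz, if_pos rfl]

-- A's bfs computes the component area of the flipped cell
theorem pvBfs_spec {g : List (List Int)} (hpre : ∀ row ∈ g, g.length ≤ row.length)
    {z : PvPos} (hz : pvInb g.length z = true) :
    pvBfs g.length g z
      = ((pvClosure g.length (pvSetCell g z 1) {z}).card : Int) := by
  set n := g.length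
  set g' := pvSetCell g z 1
  have hzU : z ∈ pvU n := mem_pvU.2 hz
  have hinv : pvBfsInv n g' [z] {z} := by
    refine ⟨List.nodup_singleton _, ?_, Finset.singleton_subset_iff.2 hzU, ?_, ?_⟩
    · intro p hp
      rw [List.mem_singleton] at hp
      rw [hp]
      exact Finset.mem_singleton_self _
    · intro p hp
      rw [Finset.mem_singleton] at hp
      rw [hp]
      exact pvCell_setCell_self hpre hz
    · intro p hp hq
      exact absurd (by rw [Finset.mem_singleton] at hp; simp [hp]) hq
  have hfuel : (pvU n \ ({z} : Finset PvPos)).card + ([z] : List PvPos).length ≤ n * n + 1 := by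
    have h1 : (pvU n \ ({z} : Finset PvPos)).card ≤ (pvU n).card :=
      Finset.card_le_card (Finset.sdiff_subset)
    rw [card_pvU] at h1
    simp only [List.length_singleton]
    omega
  have := pvBfsLoop_spec (n := n) (g := g') (n * n + 1) [z] {z} 0 hinv hfuel
  unfold pvBfs
  rw [this]
  simp

-- ---------- B side: the flood fill labels exactly one closure ----------

theorem pvFloodPush_fold {n : ℕ} {g : List (List Int)} {cid : ℕ} {K₀ : PvPos → Option ℕ}
    {p : PvPos} {C : Finset PvPos}
    (hCU : C ⊆ pvU n) (hCcell : ∀ x ∈ C, pvCell g x = 1) (hCK : ∀ x ∈ C, K₀ x = none)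
    (hK : ∀ a b, (K₀ a).isSome → b ∈ pvNbrs n g a → (K₀ b).isSome) (hpC : p ∈ C) :
    ∀ (cs : List PvPos), (∀ c ∈ cs, c ∈ pvCands p) →
    ∀ (stk l : List PvPos) (cnt : Int), l.Nodup → (∀ x ∈ l, x ∈ pvNbrs n g p ∧ x ∉ C) →
    ∃ l', (List.foldl
        (fun (st : List PvPos × (PvPos → Option ℕ) × Int) q =>
          if pvInb n q = true ∧ pvCell g q = 1 ∧ st.2.1 q = none then
            (q :: st.1, fun r => if r = q then some cid else st.2.1 r, st.2.2 + 1)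
          else st)
        (l ++ stk, (fun r => if r ∈ C ∪ l.toFinset then some cid else K₀ r),
          cnt + (l.length : Int)) cs
      = (l' ++ stk, (fun r => if r ∈ C ∪ l'.toFinset then some cid else K₀ r),
          cnt + (l'.length : Int)))
      ∧ l'.Nodup ∧ (∀ x ∈ l', x ∈ pvNbrs n g p ∧ x ∉ C) ∧ (∀ x ∈ l, x ∈ l')
      ∧ (∀ c ∈ cs, c ∈ pvNbrs n g p → c ∈ C ∪ l'.toFinset) := by
  intro cs
  induction cs with
  | nil =>
      intro _ stk l cnt hnd hl
      exact ⟨l, rfl, hnd, hl, fun x hx => hx, by simp⟩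
  | cons c cs ih =>
      intro hcs stk l cnt hnd hl
      have hcand : c ∈ pvCands p := hcs c List.mem_cons_self
      rw [List.foldl_cons]
      by_cases hc : c ∈ pvNbrs n g p ∧ c ∉ C ∪ l.toFinset
      · -- pushed
        have hcin := mem_pvNbrs.1 hc.1
        have hcK : K₀ c = none := by
          cases hK0 : K₀ c with
          | none => rfl
          | some k =>
              exfalso
              have hpinb : pvInb n p = true := mem_pvU.1 (hCU hpC)
              have hpn : p ∈ pvNbrs n g c :=
                mem_pvNbrs.2 ⟨pvCands_symm hcand, hpinb, hCcell p hpC⟩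
              have := hK c p (by rw [hK0]; rfl) hpn
              rw [hCK p hpC] at this
              exact absurd this (by simp)
        have hcond : pvInb n c = true ∧ pvCell g c = 1 ∧
            (if c ∈ C ∪ l.toFinset then some cid else K₀ c) = none := by
          refine ⟨hcin.2.1, hcin.2.2, ?_⟩
          rw [if_neg hc.2]
          exact hcK
        rw [if_pos hcond]
        have hnotl : c ∉ l := fun h => hc.2 (Finset.mem_union_right _ (List.mem_toFinset.2 h))
        have hnd' : (c :: l).Nodup := List.nodup_cons.2 ⟨hnotl, hnd⟩
        have hl' : ∀ x ∈ c :: l, x ∈ pvNbrs n g p ∧ x ∉ C := by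
          intro x hx
          rcases List.mem_cons.1 hx with rfl | hx
          · exact ⟨hc.1, fun h => hc.2 (Finset.mem_union_left _ h)⟩
          · exact hl x hx
        have hlabeq : (fun r => if r = c then some cid
              else if r ∈ C ∪ l.toFinset then some cid else K₀ r)
            = (fun r => if r ∈ C ∪ (c :: l).toFinset then some cid else K₀ r) := by
          funext r
          by_cases hr : r = c
          · rw [if_pos hr, if_pos]
            rw [hr]
            exact Finset.mem_union_right _ (List.mem_toFinset.2 List.mem_cons_self)
          · rw [if_neg hr]
            by_cases hr2 : r ∈ C ∪ l.toFinset
            · rw [if_pos hr2, if_pos]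
              rcases Finset.mem_union.1 hr2 with h | h
              · exact Finset.mem_union_left _ h
              · exact Finset.mem_union_right _
                  (List.mem_toFinset.2 (List.mem_cons_of_mem _ (List.mem_toFinset.1 h)))
            · rw [if_neg hr2, if_neg]
              intro h
              rcases Finset.mem_union.1 h with h | h
              · exact hr2 (Finset.mem_union_left _ h)
              · rcases List.mem_cons.1 (List.mem_toFinset.1 h) with h | h
                · exact hr h
                · exact hr2 (Finset.mem_union_right _ (List.mem_toFinset.2 h))
        have hcnt : cnt + (l.length : Int) + 1 = cnt + ((c :: l).length : Int) := by
          simp only [List.length_cons]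
          push_cast
          ring
        obtain ⟨l', h1, h2, h3, h4, h5⟩ := ih (fun d hd => hcs d (List.mem_cons_of_mem _ hd))
          stk (c :: l) cnt hnd' hl'
        refine ⟨l', ?_, h2, h3, fun x hx => h4 x (List.mem_cons_of_mem _ hx), ?_⟩
        · dsimp only
          rw [hlabeq, hcnt, ← List.cons_append]
          exact h1
        · intro d hd hdn
          rcases List.mem_cons.1 hd with rfl | hd
          · exact Finset.mem_union_right _ (List.mem_toFinset.2 (h4 _ List.mem_cons_self))
          · exact h5 d hd hdn
      · -- not pushed: the candidate is water, out of range, or already labelled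
        have hcond : ¬(pvInb n c = true ∧ pvCell g c = 1 ∧
            (if c ∈ C ∪ l.toFinset then some cid else K₀ c) = none) := by
          intro h
          apply hc
          refine ⟨mem_pvNbrs.2 ⟨hcand, h.1, h.2.1⟩, ?_⟩
          intro hmem
          rw [if_pos hmem] at h
          exact absurd h.2.2 (by simp)
        rw [if_neg hcond]
        obtain ⟨l', h1, h2, h3, h4, h5⟩ := ih (fun d hd => hcs d (List.mem_cons_of_mem _ hd))
          stk l cnt hnd hl
        refine ⟨l', h1, h2, h3, h4, ?_⟩
        intro d hd hdn
        rcases List.mem_cons.1 hd with rfl | hd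
        · have hdC : d ∈ C ∪ l.toFinset := by
            by_contra h
            exact hc ⟨hdn, h⟩
          rcases Finset.mem_union.1 hdC with h | h
          · exact Finset.mem_union_left _ h
          · exact Finset.mem_union_right _ (List.mem_toFinset.2 (h4 _ (List.mem_toFinset.1 h)))
        · exact h5 d hd hdn

theorem pvFloodLoop_spec {n : ℕ} {g : List (List Int)} {cid : ℕ} {K₀ : PvPos → Option ℕ}
    (hK : ∀ a b, (K₀ a).isSome → b ∈ pvNbrs n g a → (K₀ b).isSome) :
    ∀ (fuel : ℕ) (stk : List PvPos) (C : Finset PvPos),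
    stk.Nodup → (∀ x ∈ stk, x ∈ C) → C ⊆ pvU n → (∀ x ∈ C, pvCell g x = 1) →
    (∀ x ∈ C, K₀ x = none) → (∀ x ∈ C, x ∉ stk → pvNbrs n g x ⊆ C) →
    (pvU n \ C).card + stk.length ≤ fuel →
    pvFloodLoop n g cid fuel stk (fun r => if r ∈ C then some cid else K₀ r) ((C.card : Int))
      = ((fun r => if r ∈ pvClosure n g C then some cid else K₀ r),
          ((pvClosure n g C).card : Int)) := by
  intro fuel
  induction fuel with
  | zero =>
      intro stk C hnd hstkC hCU hCcell hCK hclosed hfuel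
      have hstk : stk = [] := by
        cases stk with
        | nil => rfl
        | cons a l => simp at hfuel
      subst hstk
      rw [pvClosure_eq_self_of_closed (fun x hx => hclosed x hx (by simp))]
      simp [pvFloodLoop]
  | succ fuel ih =>
      intro stk C hnd hstkC hCU hCcell hCK hclosed hfuel
      cases stk with
      | nil =>
          rw [pvClosure_eq_self_of_closed (fun x hx => hclosed x hx (by simp))]
          simp [pvFloodLoop]
      | cons p stk =>
          have hpC : p ∈ C := hstkC p List.mem_cons_self
          obtain ⟨l', hfold, hl'nd, hl'mem, _, hcover⟩ :=
            pvFloodPush_fold (n := n) (g := g) (cid := cid) (K₀ := K₀)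
              hCU hCcell hCK hK hpC (pvCands p) (fun c hc => hc)
              stk [] ((C.card : Int)) (by simp) (by simp)
          simp only [List.nil_append, List.toFinset_nil, Finset.union_empty,
            List.length_nil, Nat.cast_zero, add_zero] at hfold
          have hstep : pvFloodLoop n g cid (fuel + 1) (p :: stk)
              (fun r => if r ∈ C then some cid else K₀ r) ((C.card : Int))
              = pvFloodLoop n g cid fuel (l' ++ stk)
                  (fun r => if r ∈ C ∪ l'.toFinset then some cid else K₀ r)
                  ((C.card : Int) + (l'.length : Int)) := by
            rw [pvFloodLoop]
            rw [hfold]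
          rw [hstep]
          -- bookkeeping mirrors the BFS case
          have hstkC' : ∀ x ∈ stk, x ∈ C := fun x hx => hstkC x (List.mem_cons_of_mem _ hx)
          have hl'nbrs : ∀ x ∈ l', x ∈ pvNbrs n g p := fun x hx => (hl'mem x hx).1
          have hl'new : ∀ x ∈ l', x ∉ C := fun x hx => (hl'mem x hx).2
          have hcov : pvNbrs n g p ⊆ C ∪ l'.toFinset := by
            intro q hq
            exact hcover q (mem_pvNbrs.1 hq).1 hq
          have hdisj : Disjoint C l'.toFinset := by
            rw [Finset.disjoint_right]
            intro x hx
            exact hl'new x (List.mem_toFinset.1 hx)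
          have hl'U : l'.toFinset ⊆ pvU n := by
            intro x hx
            exact pvNbrs_subset_pvU (hl'nbrs x (List.mem_toFinset.1 hx))
          have hcardl' : l'.toFinset.card = l'.length := List.toFinset_card_of_nodup hl'nd
          have hsub : l'.toFinset ⊆ pvU n \ C := by
            intro x hx
            exact Finset.mem_sdiff.2 ⟨hl'U hx, hl'new x (List.mem_toFinset.1 hx)⟩
          have hUeq : (pvU n \ C) \ l'.toFinset = pvU n \ (C ∪ l'.toFinset) :=
            sdiff_sdiff _ _ _
          have hk : l'.toFinset.card ≤ (pvU n \ C).card := Finset.card_le_card hsub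
          have hcard2 : (pvU n \ (C ∪ l'.toFinset)).card
              = (pvU n \ C).card - l'.length := by
            rw [← hUeq, Finset.card_sdiff, Finset.inter_eq_left.2 hsub, hcardl']
          have hfuel' : (pvU n \ (C ∪ l'.toFinset)).card + (l' ++ stk).length ≤ fuel := by
            rw [hcard2, List.length_append]
            simp only [List.length_cons] at hfuel
            rw [hcardl'] at hk
            omega
          have hcardv : ((C ∪ l'.toFinset).card : Int) = (C.card : Int) + (l'.length : Int) := by
            rw [Finset.card_union_of_disjoint hdisj, hcardl']
            push_cast
            ring
          have hclo : pvClosure n g (C ∪ l'.toFinset) = pvClosure n g C := by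
            refine pvClosure_closed_eq hCU Finset.subset_union_left ?_
            refine Finset.union_subset (pvClosure_infl _) ?_
            intro x hx
            exact pvClosure_absorb hCU (pvClosure_infl _ hpC)
              (hl'nbrs x (List.mem_toFinset.1 hx))
          have := ih (l' ++ stk) (C ∪ l'.toFinset)
            (by
              rw [List.nodup_append]
              refine ⟨hl'nd, hnd.of_cons, ?_⟩
              intro x hx y hy hxy
              exact hl'new x hx (hxy ▸ hstkC' y hy))
            (by
              intro x hx
              rcases List.mem_append.1 hx with hx | hx
              · exact Finset.mem_union_right _ (List.mem_toFinset.2 hx)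
              · exact Finset.mem_union_left _ (hstkC' x hx))
            (Finset.union_subset hCU hl'U)
            (by
              intro x hx
              rcases Finset.mem_union.1 hx with hx | hx
              · exact hCcell x hx
              · exact (mem_pvNbrs.1 (hl'nbrs x (List.mem_toFinset.1 hx))).2.2)
            (by
              intro x hx
              rcases Finset.mem_union.1 hx with hx | hx
              · exact hCK x hx
              · -- freshly pushed cells were unlabelled, as in pvFloodPush_fold
                cases hK0 : K₀ x with
                | none => rfl
                | some k =>
                    exfalso
                    have hxl := List.mem_toFinset.1 hx
                    have hpinb : pvInb n p = true := mem_pvU.1 (hCU hpC)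
                    have hpn : p ∈ pvNbrs n g x :=
                      mem_pvNbrs.2 ⟨pvCands_symm (mem_pvNbrs.1 (hl'nbrs x hxl)).1,
                        hpinb, hCcell p hpC⟩
                    have := hK x p (by rw [hK0]; rfl) hpn
                    rw [hCK p hpC] at this
                    exact absurd this (by simp))
            (by
              intro x hx hxq
              rcases Finset.mem_union.1 hx with hx | hx
              · by_cases hxp : x = p
                · rw [hxp]
                  exact hcov
                · have hxs : x ∉ stk := fun h => hxq (List.mem_append_right _ h)
                  have hxold : x ∉ p :: stk := by
                    simp [hxp, hxs]
                  exact (hclosed x hx hxold).trans Finset.subset_union_left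
              · exact absurd (List.mem_append_left _ (List.mem_toFinset.1 hx)) hxq)
            hfuel'
          rw [← hcardv, this, hclo]

-- ---------- B side: the labelling pass ----------

def pvLabInv (n : ℕ) (g : List (List Int)) (lab : PvPos → Option ℕ) (sizes : List Int)
    (comps : List (Finset PvPos)) : Prop :=
  sizes = comps.map (fun c => ((c.card : Int))) ∧
  (∀ q k, lab q = some k ↔ ∃ h : k < comps.length, q ∈ comps[k]) ∧
  (∀ k (h : k < comps.length), ∀ w ∈ comps[k],
    pvInb n w = true ∧ pvCell g w = 1 ∧ pvClosure n g {w} = comps[k])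

-- a labelled dictionary built this way is closed under land neighbours
theorem pvLabInv_closed {n : ℕ} {g : List (List Int)} {lab : PvPos → Option ℕ}
    {sizes : List Int} {comps : List (Finset PvPos)} (hinv : pvLabInv n g lab sizes comps) :
    ∀ a b, (lab a).isSome → b ∈ pvNbrs n g a → (lab b).isSome := by
  obtain ⟨_, hchar, hcomp⟩ := hinv
  intro a b ha hb
  cases hla : lab a with
  | none => rw [hla] at ha; exact absurd ha (by simp)
  | some k =>
      obtain ⟨hk, hak⟩ := (hchar a k).1 hla
      have haU : ({a} : Finset PvPos) ⊆ pvU n :=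
        Finset.singleton_subset_iff.2 (mem_pvU.2 (hcomp k hk a hak).1)
      have hbk : b ∈ comps[k] := by
        rw [← (hcomp k hk a hak).2.2]
        exact pvClosure_absorb haU (pvClosure_infl _ (Finset.mem_singleton_self a)) hb
      rw [(hchar b k).2 ⟨hk, hbk⟩]
      rfl

-- a cell of the fresh component cannot carry an older label
theorem pvLabInv_fresh {n : ℕ} {g : List (List Int)} {lab : PvPos → Option ℕ}
    {sizes : List Int} {comps : List (Finset PvPos)} (hinv : pvLabInv n g lab sizes comps)
    {p : PvPos} (hpinb : pvInb n p = true) (hpcell : pvCell g p = 1) (hplab : lab p = none)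
    {q : PvPos} (hq : q ∈ pvClosure n g {p}) : lab q = none := by
  obtain ⟨_, hchar, hcomp⟩ := hinv
  cases hlq : lab q with
  | none => rfl
  | some k =>
      exfalso
      obtain ⟨hk, hqk⟩ := (hchar q k).1 hlq
      have hqcl : pvClosure n g {q} = pvClosure n g {p} :=
        pvClosure_comp_eq ⟨hpinb, hpcell⟩ hq
      have hpk : p ∈ comps[k] := by
        rw [← (hcomp k hk q hqk).2.2, hqcl]
        exact pvClosure_infl _ (Finset.mem_singleton_self p)
      have := (hchar p k).2 ⟨hk, hpk⟩
      rw [hplab] at this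
      exact Option.some_ne_none _ this.symm

theorem pvLabelLoop_spec {n : ℕ} {g : List (List Int)} :
    ∀ (cells : List PvPos) (lab : PvPos → Option ℕ) (sizes : List Int)
      (comps : List (Finset PvPos)),
    (∀ c ∈ cells, c ∈ pvU n) → pvLabInv n g lab sizes comps →
    ∃ comps',
      pvLabInv n g
        (cells.foldl (fun st p =>
          if pvCell g p = 1 ∧ st.1 p = none then
            let cid := st.2.length
            let res := pvFloodLoop n g cid (n * n + 1) [p]
              (fun r => if r = p then some cid else st.1 r) 1
            (res.1, st.2 ++ [res.2])
          else st) (lab, sizes)).1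
        (cells.foldl (fun st p =>
          if pvCell g p = 1 ∧ st.1 p = none then
            let cid := st.2.length
            let res := pvFloodLoop n g cid (n * n + 1) [p]
              (fun r => if r = p then some cid else st.1 r) 1
            (res.1, st.2 ++ [res.2])
          else st) (lab, sizes)).2 comps' ∧
      (∀ c ∈ cells, pvCell g c = 1 →
        ((cells.foldl (fun st p =>
          if pvCell g p = 1 ∧ st.1 p = none then
            let cid := st.2.length
            let res := pvFloodLoop n g cid (n * n + 1) [p]
              (fun r => if r = p then some cid else st.1 r) 1
            (res.1, st.2 ++ [res.2])
          else st) (lab, sizes)).1 c).isSome) ∧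
      (∀ q, (lab q).isSome →
        (cells.foldl (fun st p =>
          if pvCell g p = 1 ∧ st.1 p = none then
            let cid := st.2.length
            let res := pvFloodLoop n g cid (n * n + 1) [p]
              (fun r => if r = p then some cid else st.1 r) 1
            (res.1, st.2 ++ [res.2])
          else st) (lab, sizes)).1 q = lab q) := by
  intro cells
  induction cells with
  | nil =>
      intro lab sizes comps _ hinv
      exact ⟨comps, hinv, by simp, fun q _ => rfl⟩
  | cons p cells ih =>
      intro lab sizes comps hcells hinv
      have hpU : p ∈ pvU n := hcells p List.mem_cons_self
      rw [List.foldl_cons]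
      by_cases hc : pvCell g p = 1 ∧ lab p = none
      · rw [if_pos hc]
        -- the flood fill labels exactly the closure of {p}
        have hKcl := pvLabInv_closed hinv
        have hflood := pvFloodLoop_spec (n := n) (g := g) (cid := sizes.length) (K₀ := lab)
          hKcl (n * n + 1) [p] {p}
          (List.nodup_singleton _)
          (by intro x hx; rw [List.mem_singleton] at hx; rw [hx]; exact Finset.mem_singleton_self _)
          (Finset.singleton_subset_iff.2 hpU)
          (by intro x hx; rw [Finset.mem_singleton] at hx; rw [hx]; exact hc.1)
          (by intro x hx; rw [Finset.mem_singleton] at hx; rw [hx]; exact hc.2)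
          (by intro x hx hxs; exact absurd (by rw [Finset.mem_singleton] at hx; simp [hx]) hxs)
          (by
            have h1 : (pvU n \ ({p} : Finset PvPos)).card ≤ (pvU n).card :=
              Finset.card_le_card (Finset.sdiff_subset)
            rw [card_pvU] at h1
            simp only [List.length_singleton]
            omega)
        have hlabarg : (fun r => if r = p then some sizes.length else lab r)
            = (fun r => if r ∈ ({p} : Finset PvPos) then some sizes.length else lab r) := by
          funext r
          simp [Finset.mem_singleton]
        have hcard1 : ((1 : Int)) = ((({p} : Finset PvPos).card : Int)) := by simp
        have hheadstate :
            (let cid := sizes.length;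
             let res := pvFloodLoop n g cid (n * n + 1) [p]
               (fun r => if r = p then some cid else lab r) 1;
             (res.1, sizes ++ [res.2]))
            = ((fun r => if r ∈ pvClosure n g ({p} : Finset PvPos) then some sizes.length
                  else lab r),
                sizes ++ [(((pvClosure n g ({p} : Finset PvPos)).card : Int))]) := by
          dsimp only
          rw [hlabarg, hcard1, hflood]
        rw [hheadstate]
        -- the new component list
        set C := pvClosure n g ({p} : Finset PvPos) with hC
        have hland : ∀ w ∈ C, pvInb n w = true ∧ pvCell g w = 1 := by
          refine pvClosure_all_land ?_
          intro x hx
          rw [Finset.mem_singleton] at hx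
          rw [hx]
          exact ⟨mem_pvU.1 hpU, hc.1⟩
        have hfresh : ∀ q ∈ C, lab q = none := by
          intro q hq
          exact pvLabInv_fresh hinv (mem_pvU.1 hpU) hc.1 hc.2 hq
        obtain ⟨hsz, hchar, hcomp⟩ := hinv
        have hlen : sizes.length = comps.length := by rw [hsz, List.length_map]
        have hinv' : pvLabInv n g
            (fun r => if r ∈ C then some sizes.length else lab r)
            (sizes ++ [((C.card : Int))]) (comps ++ [C]) := by
          refine ⟨?_, ?_, ?_⟩
          · rw [hsz, List.map_append, List.map_cons, List.map_nil]
          · intro q k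
            dsimp only
            by_cases hq : q ∈ C
            · rw [if_pos hq]
              constructor
              · intro h
                have hkk : k = sizes.length := by
                  have := Option.some.inj h
                  omega
                have hkb : k < (comps ++ [C]).length := by
                  simp only [List.length_append, List.length_singleton]
                  omega
                refine ⟨hkb, ?_⟩
                have hgc : (comps ++ [C])[k]'hkb = C := by
                  subst hkk
                  rw [List.getElem_append_right (by omega)]
                  simp [hlen]
                rw [hgc]
                exact hq
              · rintro ⟨hk, hqk⟩
                rw [List.length_append, List.length_singleton] at hk
                by_cases hkold : k < comps.length
                · exfalso
                  rw [List.getElem_append_left hkold] at hqk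
                  have := (hchar q k).2 ⟨hkold, hqk⟩
                  rw [hfresh q hq] at this
                  exact Option.some_ne_none _ this.symm
                · have hkk : k = comps.length := by omega
                  rw [hkk, ← hlen]
            · rw [if_neg hq]
              constructor
              · intro h
                obtain ⟨hk, hqk⟩ := (hchar q k).1 h
                exact ⟨by rw [List.length_append]; omega,
                  by rw [List.getElem_append_left hk]; exact hqk⟩
              · rintro ⟨hk, hqk⟩
                rw [List.length_append, List.length_singleton] at hk
                by_cases hkold : k < comps.length
                · rw [List.getElem_append_left hkold] at hqk
                  exact (hchar q k).2 ⟨hkold, hqk⟩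
                · exfalso
                  have hkk : k = comps.length := by omega
                  rw [List.getElem_append_right (by omega)] at hqk
                  simp only [hkk] at hqk
                  simp at hqk
                  exact hq hqk
          · intro k hk w hw
            rw [List.length_append, List.length_singleton] at hk
            by_cases hkold : k < comps.length
            · rw [List.getElem_append_left hkold] at hw ⊢
              exact hcomp k hkold w hw
            · have hkk : k = comps.length := by omega
              subst hkk
              rw [List.getElem_append_right (by omega)] at hw ⊢
              simp only [Nat.sub_self, List.getElem_singleton] at hw ⊢
              refine ⟨(hland w hw).1, (hland w hw).2, ?_⟩
              exact pvClosure_comp_eq ⟨mem_pvU.1 hpU, hc.1⟩ hw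
        obtain ⟨comps', hinv'', hcompl, hpres⟩ := ih
          (fun r => if r ∈ C then some sizes.length else lab r)
          (sizes ++ [((C.card : Int))]) (comps ++ [C])
          (fun c hcc => hcells c (List.mem_cons_of_mem _ hcc)) hinv'
        refine ⟨comps', hinv'', ?_, ?_⟩
        · intro c hcc hcell
          rcases List.mem_cons.1 hcc with rfl | hcc
          · have hcin : (if c ∈ C then some sizes.length else lab c) = some sizes.length := by
              rw [if_pos (pvClosure_infl _ (Finset.mem_singleton_self c))]
            rw [hpres c (by rw [hcin]; rfl), hcin]
            rfl
          · exact hcompl c hcc hcell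
        · intro q hq
          have hqC : q ∉ C := by
            intro h
            rw [hfresh q h] at hq
            exact absurd hq (by simp)
          have : (if q ∈ C then some sizes.length else lab q) = lab q := if_neg hqC
          rw [hpres q (by rw [this]; exact hq), this]
      · rw [if_neg hc]
        obtain ⟨comps', h1, h2, h3⟩ :=
          ih lab sizes comps (fun c hcc => hcells c (List.mem_cons_of_mem _ hcc)) hinv
        refine ⟨comps', h1, ?_, h3⟩
        intro c hcc hcell
        rcases List.mem_cons.1 hcc with rfl | hcc
        · have hsome : (lab c).isSome := by
            cases hl : lab c with
            | none => exact absurd ⟨hcell, hl⟩ hc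
            | some k => rfl
          rw [h3 c hsome]
          exact hsome
        · exact h2 c hcc hcell

theorem mem_pvCellsList {n : ℕ} {p : PvPos} :
    p ∈ pvCellsList n ↔ pvInb n p = true := by
  simp only [pvCellsList, List.mem_flatMap, List.mem_map, List.mem_range, pvInb,
    decide_eq_true_eq]
  constructor
  · rintro ⟨i, hi, j, hj, rfl⟩
    dsimp only
    refine ⟨by positivity, by exact_mod_cast hi, by positivity, by exact_mod_cast hj⟩
  · rintro ⟨h1, h2, h3, h4⟩
    refine ⟨p.1.toNat, by omega, p.2.toNat, by omega, ?_⟩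
    rw [Prod.ext_iff]
    constructor
    · simp [Int.toNat_of_nonneg h1]
    · simp [Int.toNat_of_nonneg h3]

theorem pvLabelAll_spec (n : ℕ) (g : List (List Int)) :
    ∃ comps, pvLabInv n g (pvLabelAll n g).1 (pvLabelAll n g).2 comps ∧
      ∀ c : PvPos, pvInb n c = true → pvCell g c = 1 → ((pvLabelAll n g).1 c).isSome := by
  have hcells : ∀ c ∈ pvCellsList n, c ∈ pvU n := by
    intro c hc
    exact mem_pvU.2 (mem_pvCellsList.1 hc)
  have hinv0 : pvLabInv n g (fun _ => none) [] [] := by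
    refine ⟨rfl, ?_, ?_⟩
    · intro q k
      constructor
      · intro h
        exact absurd h (by simp)
      · rintro ⟨h, _⟩
        simp at h
    · intro k h
      simp at h
  obtain ⟨comps, hinv, hcompl, _⟩ :=
    pvLabelLoop_spec (n := n) (g := g) (pvCellsList n) (fun _ => none) [] [] hcells hinv0
  refine ⟨comps, hinv, ?_⟩
  intro c hcinb hccell
  exact hcompl c (mem_pvCellsList.2 hcinb) hccell

theorem pvCands_ne {p q : PvPos} (h : q ∈ pvCands p) : q ≠ p := by
  simp only [pvCands, List.mem_cons, List.not_mem_nil, or_false] at h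
  obtain ⟨a, b⟩ := p
  obtain ⟨c, d⟩ := q
  simp only [Prod.mk.injEq, ne_eq, not_and]
  rcases h with h | h | h | h <;>
    (rw [Prod.mk.injEq] at h; intro h1 h2; omega)

theorem pvNbrs_grid_mono {n : ℕ} {g : List (List Int)} {z : PvPos}
    (hpre : ∀ row ∈ g, g.length ≤ row.length)
    (hz : pvInb g.length z = true) (hz0 : pvCell g z = 0) :
    ∀ q, pvNbrs n g q ⊆ pvNbrs n (pvSetCell g z 1) q := by
  intro q x hx
  obtain ⟨h1, h2, h3⟩ := mem_pvNbrs.1 hx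
  refine mem_pvNbrs.2 ⟨h1, h2, ?_⟩
  rw [pvCell_setCell hpre hz, if_neg ?_]
  · exact h3
  · intro h
    rw [h] at h3
    rw [hz0] at h3
    exact absurd h3 (by norm_num)

theorem pvClosure_grid_mono {n : ℕ} {g g' : List (List Int)}
    (h : ∀ q, pvNbrs n g q ⊆ pvNbrs n g' q) (S : Finset PvPos) :
    pvClosure n g S ⊆ pvClosure n g' S := by
  unfold pvClosure
  induction n * n with
  | zero => simp
  | succ k ih =>
      rw [Function.iterate_succ_apply', Function.iterate_succ_apply']
      intro x hx
      rcases Finset.mem_union.1 hx with hx | hx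
      · exact Finset.mem_union_left _ (ih hx)
      · obtain ⟨q, hq, hx⟩ := Finset.mem_biUnion.1 hx
        exact Finset.mem_union_right _ (Finset.mem_biUnion.2 ⟨q, ih hq, h q hx⟩)

-- flipping the zero merges it with the distinct neighbouring components
theorem pvClosure_flip {g : List (List Int)} (hpre : ∀ row ∈ g, g.length ≤ row.length)
    {z : PvPos} (hz : pvInb g.length z = true) (hz0 : pvCell g z = 0) :
    pvClosure g.length (pvSetCell g z 1) {z}
      = insert z ((pvNbrs g.length g z).biUnion
          (fun w => pvClosure g.length g {w})) := by
  have hcell' := pvCell_setCell hpre hz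
  have hmono := pvNbrs_grid_mono (n := g.length) hpre hz hz0
  have hzU : z ∈ pvU g.length := mem_pvU.2 hz
  have hXU : ∀ w ∈ pvNbrs g.length g z, ({w} : Finset PvPos) ⊆ pvU g.length :=
    fun w hw => Finset.singleton_subset_iff.2 (pvNbrs_subset_pvU hw)
  apply Finset.Subset.antisymm
  · refine pvClosure_minimal ?_ ?_
    · rw [Finset.singleton_subset_iff]
      exact Finset.mem_insert_self _ _
    · intro x hx y hy
      by_cases hyz : y = z
      · rw [hyz]
        exact Finset.mem_insert_self _ _
      · have hy' := mem_pvNbrs.1 hy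
        have hycell : pvCell g y = 1 := by
          have := hy'.2.2
          rwa [hcell' y, if_neg hyz] at this
        rcases Finset.mem_insert.1 hx with rfl | hx
        · -- y is a land neighbour of z itself
          refine Finset.mem_insert_of_mem (Finset.mem_biUnion.2
            ⟨y, mem_pvNbrs.2 ⟨hy'.1, hy'.2.1, hycell⟩, ?_⟩)
          exact pvClosure_infl _ (Finset.mem_singleton_self y)
        · obtain ⟨w, hw, hx⟩ := Finset.mem_biUnion.1 hx
          refine Finset.mem_insert_of_mem (Finset.mem_biUnion.2 ⟨w, hw, ?_⟩)
          exact pvClosure_absorb (hXU w hw) hx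
            (mem_pvNbrs.2 ⟨hy'.1, hy'.2.1, hycell⟩)
  · rw [Finset.insert_subset_iff]
    constructor
    · exact pvClosure_infl _ (Finset.mem_singleton_self z)
    · rw [Finset.biUnion_subset]
      intro w hw
      have hwz : w ≠ z := pvCands_ne (mem_pvNbrs.1 hw).1
      have hw' : w ∈ pvNbrs g.length (pvSetCell g z 1) z := by
        obtain ⟨h1, h2, h3⟩ := mem_pvNbrs.1 hw
        refine mem_pvNbrs.2 ⟨h1, h2, ?_⟩
        rw [hcell' w, if_neg hwz]
        exact h3
      have hwin : w ∈ pvClosure g.length (pvSetCell g z 1) {z} :=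
        pvClosure_absorb (Finset.singleton_subset_iff.2 hzU)
          (pvClosure_infl _ (Finset.mem_singleton_self z)) hw'
      calc pvClosure g.length g {w}
          ⊆ pvClosure g.length (pvSetCell g z 1) {w} := pvClosure_grid_mono hmono _
        _ ⊆ pvClosure g.length (pvSetCell g z 1) {z} :=
            pvClosure_singleton_subset (Finset.singleton_subset_iff.2 hzU) hwin

-- ---------- B side: the per-zero distinct-component sum ----------

theorem pvSeen_fold {n : ℕ} {g : List (List Int)} {lab : PvPos → Option ℕ}
    {sizes : List Int} {comps : List (Finset PvPos)} (hinv : pvLabInv n g lab sizes comps)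
    (hcompl : ∀ c : PvPos, pvInb n c = true → pvCell g c = 1 → (lab c).isSome) :
    ∀ (cs : List PvPos) (seen : PySem.Set ℕ) (M : Finset ℕ) (tot : Int),
    (∀ k, k ∈ seen ↔ k ∈ M) → (∀ k ∈ M, k < comps.length) →
    tot = 1 + (((M.biUnion (fun k => comps.getD k ∅)).card : Int)) →
    ∃ M' : Finset ℕ, (∀ k ∈ M', k < comps.length) ∧
      ((cs.foldl (fun (st : PySem.Set ℕ × Int) q =>
        if pvInb n q = true ∧ pvCell g q = 1 then
          match lab q with
          | some cid => if cid ∈ st.1 then st else (st.1.add cid, st.2 + sizes.getD cid 0)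
          | none => st
        else st) (seen, tot)).2
        = 1 + (((M'.biUnion (fun k => comps.getD k ∅)).card : Int))) ∧
      (∀ k, k ∈ M' ↔ k ∈ M ∨ ∃ c ∈ cs, pvInb n c = true ∧ pvCell g c = 1 ∧ lab c = some k) := by
  obtain ⟨hsz, hchar, hcomp⟩ := hinv
  intro cs
  induction cs with
  | nil =>
      intro seen M tot hseen hM htot
      exact ⟨M, hM, htot, by simp⟩
  | cons q cs ih =>
      intro seen M tot hseen hM htot
      rw [List.foldl_cons]
      by_cases hq : pvInb n q = true ∧ pvCell g q = 1
      · rw [if_pos hq]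
        have hqsome := hcompl q hq.1 hq.2
        cases hlq : lab q with
        | none => rw [hlq] at hqsome; exact absurd hqsome (by simp)
        | some k =>
            obtain ⟨hk, hqk⟩ := (hchar q k).1 hlq
            by_cases hks : k ∈ seen
            · dsimp only
              rw [if_pos hks]
              obtain ⟨M', h1, h2, h3⟩ := ih seen M tot hseen hM htot
              refine ⟨M', h1, h2, ?_⟩
              intro k'
              rw [h3 k']
              constructor
              · rintro (h | h)
                · exact Or.inl h
                · exact Or.inr ⟨h.choose, List.mem_cons_of_mem _ h.choose_spec.1,
                    h.choose_spec.2⟩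
              · rintro (h | ⟨c, hc, hcp⟩)
                · exact Or.inl h
                · rcases List.mem_cons.1 hc with rfl | hc
                  · left
                    have : k' = k := by
                      rw [hlq] at hcp
                      exact (Option.some.inj hcp.2.2).symm
                    rw [this]
                    exact (hseen k).1 hks
                  · exact Or.inr ⟨c, hc, hcp⟩
            · dsimp only
              rw [if_neg hks]
              have hkM : k ∉ M := fun h => hks ((hseen k).2 h)
              have hsizek : sizes.getD k 0 = ((comps[k].card : Int)) := by
                rw [hsz, List.getD_eq_getElem?_getD, List.getElem?_map,
                  List.getElem?_eq_getElem hk]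
                rfl
              have hdisj : Disjoint (comps.getD k ∅)
                  (M.biUnion (fun k' => comps.getD k' ∅)) := by
                rw [Finset.disjoint_right]
                intro x hx hxk
                obtain ⟨k', hk', hxk'⟩ := Finset.mem_biUnion.1 hx
                have hk'lt := hM k' hk'
                have hgk : comps.getD k ∅ = comps[k] := List.getD_eq_getElem _ _ hk
                have hgk' : comps.getD k' ∅ = comps[k'] := List.getD_eq_getElem _ _ hk'lt
                rw [hgk] at hxk
                rw [hgk'] at hxk'
                have e1 := (hchar x k).2 ⟨hk, hxk⟩
                have e2 := (hchar x k').2 ⟨hk'lt, hxk'⟩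
                rw [e1] at e2
                have : k = k' := Option.some.inj e2
                rw [this] at hkM
                exact hkM hk'
              have hcardu : ((insert k M).biUnion (fun k' => comps.getD k' ∅)).card
                  = (comps.getD k ∅).card
                    + (M.biUnion (fun k' => comps.getD k' ∅)).card := by
                rw [Finset.biUnion_insert]
                exact Finset.card_union_of_disjoint hdisj
              obtain ⟨M', h1, h2, h3⟩ := ih (seen.add k) (insert k M)
                (tot + sizes.getD k 0)
                (by
                  intro k'
                  rw [PySem.Set.mem_add, Finset.mem_insert]
                  constructor
                  · rintro (h | h)
                    · exact Or.inr ((hseen k').1 h)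
                    · exact Or.inl h
                  · rintro (h | h)
                    · exact Or.inr h
                    · exact Or.inl ((hseen k').2 h))
                (by
                  intro k' hk'
                  rcases Finset.mem_insert.1 hk' with rfl | hk'
                  · exact hk
                  · exact hM k' hk')
                (by
                  rw [htot, hsizek, hcardu]
                  have : comps.getD k ∅ = comps[k] := List.getD_eq_getElem _ _ hk
                  rw [this]
                  push_cast
                  ring)
              refine ⟨M', h1, h2, ?_⟩
              intro k'
              rw [h3 k']
              constructor
              · rintro (h | h)
                · rcases Finset.mem_insert.1 h with rfl | h
                  · exact Or.inr ⟨q, List.mem_cons_self, hq.1, hq.2, hlq⟩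
                  · exact Or.inl h
                · exact Or.inr ⟨h.choose, List.mem_cons_of_mem _ h.choose_spec.1,
                    h.choose_spec.2⟩
              · rintro (h | ⟨c, hc, hcp⟩)
                · exact Or.inl (Finset.mem_insert_of_mem h)
                · rcases List.mem_cons.1 hc with rfl | hc
                  · left
                    have : k' = k := by
                      rw [hlq] at hcp
                      exact (Option.some.inj hcp.2.2).symm
                    rw [this]
                    exact Finset.mem_insert_self _ _
                  · exact Or.inr ⟨c, hc, hcp⟩
      · rw [if_neg hq]
        obtain ⟨M', h1, h2, h3⟩ := ih seen M tot hseen hM htot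
        refine ⟨M', h1, h2, ?_⟩
        intro k'
        rw [h3 k']
        constructor
        · rintro (h | h)
          · exact Or.inl h
          · exact Or.inr ⟨h.choose, List.mem_cons_of_mem _ h.choose_spec.1, h.choose_spec.2⟩
        · rintro (h | ⟨c, hc, hcp⟩)
          · exact Or.inl h
          · rcases List.mem_cons.1 hc with rfl | hc
            · exact absurd ⟨hcp.1, hcp.2.1⟩ hq
            · exact Or.inr ⟨c, hc, hcp⟩

theorem pvZeroTotal_spec {g : List (List Int)} (hpre : ∀ row ∈ g, g.length ≤ row.length)
    {z : PvPos} (hz : pvInb g.length z = true) (hz0 : pvCell g z = 0)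
    {lab : PvPos → Option ℕ} {sizes : List Int} {comps : List (Finset PvPos)}
    (hinv : pvLabInv g.length g lab sizes comps)
    (hcompl : ∀ c : PvPos, pvInb g.length c = true → pvCell g c = 1 → (lab c).isSome) :
    pvZeroTotal g.length g lab sizes z
      = ((pvClosure g.length (pvSetCell g z 1) {z}).card : Int) := by
  obtain ⟨M', hM'lt, hval, hmem⟩ := pvSeen_fold hinv hcompl (pvCands z)
    (PySem.Set.ofList []) ∅ 1
    (by intro k; simp)
    (by simp)
    (by simp)
  obtain ⟨hsz, hchar, hcomp⟩ := hinv
  have hXeq : M'.biUnion (fun k => comps.getD k ∅)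
      = (pvNbrs g.length g z).biUnion (fun w => pvClosure g.length g {w}) := by
    apply Finset.Subset.antisymm
    · intro x hx
      obtain ⟨k, hk, hxk⟩ := Finset.mem_biUnion.1 hx
      rcases (hmem k).1 hk with h | ⟨c, hc, h1, h2, h3⟩
      · simp at h
      · have hklt := hM'lt k hk
        rw [List.getD_eq_getElem _ _ hklt] at hxk
        obtain ⟨hk2, hck2⟩ := (hchar c k).1 h3
        refine Finset.mem_biUnion.2 ⟨c, mem_pvNbrs.2 ⟨hc, h1, h2⟩, ?_⟩
        rw [(hcomp k hklt c hck2).2.2]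
        exact hxk
    · intro x hx
      obtain ⟨w, hw, hxw⟩ := Finset.mem_biUnion.1 hx
      obtain ⟨hwc, hwinb, hwcell⟩ := mem_pvNbrs.1 hw
      have hsome := hcompl w hwinb hwcell
      cases hlw : lab w with
      | none => rw [hlw] at hsome; exact absurd hsome (by simp)
      | some k =>
          obtain ⟨hk, hwk⟩ := (hchar w k).1 hlw
          have hkM : k ∈ M' := (hmem k).2 (Or.inr ⟨w, hwc, hwinb, hwcell, hlw⟩)
          refine Finset.mem_biUnion.2 ⟨k, hkM, ?_⟩
          rw [List.getD_eq_getElem _ _ hk, ← (hcomp k hk w hwk).2.2]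
          exact hxw
  have hznot : z ∉ (pvNbrs g.length g z).biUnion (fun w => pvClosure g.length g {w}) := by
    intro h
    obtain ⟨w, hw, hzw⟩ := Finset.mem_biUnion.1 h
    have hland := pvClosure_all_land (n := g.length) (g := g) (S := {w})
      (by
        intro x hx
        rw [Finset.mem_singleton] at hx
        rw [hx]
        exact ⟨(mem_pvNbrs.1 hw).2.1, (mem_pvNbrs.1 hw).2.2⟩) z hzw
    have := hland.2
    rw [hz0] at this
    exact absurd this (by norm_num)
  show ((pvCands z).foldl _ (PySem.Set.ofList [], 1)).2 = _
  rw [hval, hXeq, pvClosure_flip hpre hz hz0, Finset.card_insert_of_notMem hznot]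
  push_cast
  ring

-- ---------- the two zero lists coincide ----------

theorem pvZeroes_eq (g : List (List Int)) (n : ℕ) : pvZeroes g n = pvZeroesB g n := by
  unfold pvZeroes pvZeroesB
  have hin : ∀ (acc : List PvPos) (i : ℕ),
      (List.range n).foldl (fun acc2 (j : ℕ) =>
        if pvCell g ((i : Int), (j : Int)) = 0 then acc2 ++ [(((i : Int), (j : Int)) : PvPos)]
        else acc2) acc
      = acc ++ ((List.range n).filter
          (fun (j : ℕ) => decide (pvCell g ((i : Int), (j : Int)) = 0))).map
          (fun (j : ℕ) => (((i : Int), (j : Int)) : PvPos)) := by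
    intro acc i
    induction (List.range n) generalizing acc with
    | nil => simp
    | cons a l ih =>
        rw [List.foldl_cons, List.filter_cons]
        by_cases h : pvCell g ((i : Int), (a : Int)) = 0
        · rw [if_pos h, ih]
          simp [h]
        · rw [if_neg h, ih]
          simp [h]
  have hfun : (fun (acc : List PvPos) (i : ℕ) =>
      (List.range n).foldl (fun acc2 (j : ℕ) =>
        if pvCell g ((i : Int), (j : Int)) = 0 then acc2 ++ [(((i : Int), (j : Int)) : PvPos)]
        else acc2) acc)
      = (fun (acc : List PvPos) (i : ℕ) => acc ++ ((List.range n).filter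
          (fun (j : ℕ) => decide (pvCell g ((i : Int), (j : Int)) = 0))).map
          (fun (j : ℕ) => (((i : Int), (j : Int)) : PvPos))) := by
    funext acc i
    exact hin acc i
  rw [hfun]
  have hflat : ∀ (acc : List PvPos) (l : List ℕ),
      l.foldl (fun (acc : List PvPos) (i : ℕ) => acc ++ ((List.range n).filter
          (fun (j : ℕ) => decide (pvCell g ((i : Int), (j : Int)) = 0))).map
          (fun (j : ℕ) => (((i : Int), (j : Int)) : PvPos))) acc
      = acc ++ l.flatMap (fun (i : ℕ) => ((List.range n).filter
          (fun (j : ℕ) => decide (pvCell g ((i : Int), (j : Int)) = 0))).map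
          (fun (j : ℕ) => (((i : Int), (j : Int)) : PvPos))) := by
    intro acc l
    induction l generalizing acc with
    | nil => simp
    | cons a l ih =>
        rw [List.foldl_cons, List.flatMap_cons, ih]
        simp
  rw [hflat]
  simp

theorem mem_pvZeroesB {g : List (List Int)} {n : ℕ} {z : PvPos}
    (h : z ∈ pvZeroesB g n) : pvInb n z = true ∧ pvCell g z = 0 := by
  unfold pvZeroesB at h
  obtain ⟨i, hi, h⟩ := List.mem_flatMap.1 h
  obtain ⟨j, hj, h⟩ := List.mem_map.1 h
  rw [List.mem_filter] at hj
  rw [List.mem_range] at hi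
  have hj2 := List.mem_range.1 hj.1
  rw [← h]
  constructor
  · simp only [pvInb, decide_eq_true_eq]
    refine ⟨by positivity, by exact_mod_cast hi, by positivity, by exact_mod_cast hj2⟩
  · exact of_decide_eq_true hj.2

-- ===== VERDICT (by name: the statement is the Claim_ definition above) =====
theorem make_a_large_island_spec : Claim_equal_make_a_large_island := by
  intro grid _ hpre
  unfold Spec_make_a_large_island make_a_large_island make_a_large_island_alt
  dsimp only
  rw [pvZeroes_eq]
  by_cases hz : pvZeroesB grid grid.length = []
  · rw [hz]
    simp
  · rw [if_neg (fun h => hz (List.length_eq_zero_iff.1 h)), if_neg hz]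
    obtain ⟨comps, hinv, hcompl⟩ := pvLabelAll_spec grid.length grid
    apply PySem.List.foldl_congr_mem
    intro acc z hzz
    have hmem := mem_pvZeroesB hzz
    rw [pvBfs_spec hpre hmem.1, pvZeroTotal_spec hpre hmem.1 hmem.2 hinv hcompl]
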